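-- pv_equiv track=rewrite | github.com/kevinrunescape1997/svg-optimizer-gui | pixel_svg_optimizer.py | _component_path_parts_from_cycles
-- ===== SOURCE A (Python) =====
-- from typing import Dict, List, Set, Tuple, Optional, Callable
--
-- PointT = Tuple[int, int]
--
-- def _compress_corners(points: List[PointT]) -> List[PointT]:
--     if not points:
--         return points
--
--     dedup: List[PointT] = []
--     for p in points:
--         if not dedup or p != dedup[-1]:
--             dedup.append(p)
--
--     if len(dedup) > 1 and dedup[0] == dedup[-1]:
--         dedup = dedup[:-1]
--     if len(dedup) <= 2:
--         return dedup + ([dedup[0]] if dedup else [])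
--
--     no_rev: List[PointT] = [dedup[0]]
--     for i in range(1, len(dedup) - 1):
--         if dedup[i - 1] == dedup[i + 1]:
--             continue
--         no_rev.append(dedup[i])
--     no_rev.append(dedup[-1])
--
--     corners: List[PointT] = [no_rev[0]]
--     for i in range(1, len(no_rev) - 1):
--         a, b, c = no_rev[i - 1], no_rev[i], no_rev[i + 1]
--         if (a[0] == b[0] == c[0]) or (a[1] == b[1] == c[1]):
--             continue
--         corners.append(b)
--     corners.append(no_rev[-1])
--     corners.append(corners[0])
--     return corners
--
-- def _relative_steps_from_corners(corners: List[PointT]) -> str: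
--     last_axis: str | None = None
--     last_value: int = 0
--     parts: List[str] = []
--     for i in range(1, len(corners)):
--         x, y = corners[i]
--         px, py = corners[i - 1]
--         dx = x - px
--         dy = y - py
--         if dy == 0 and dx != 0:
--             if last_axis == "h":
--                 last_value += dx
--                 parts[-1] = f"h{last_value}"
--             else:
--                 parts.append(f"h{dx}")
--                 last_axis = "h"
--                 last_value = dx
--         elif dx == 0 and dy != 0:
--             if last_axis == "v":
--                 last_value += dy
--                 parts[-1] = f"v{last_value}"
--             else:
--                 parts.append(f"v{dy}")
--                 last_axis = "v"
--                 last_value = dy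
--         else:
--             parts.append(f"l{dx} {dy}")
--             last_axis = None
--             last_value = 0
--     parts.append("z")
--     return " ".join(parts)
--
-- def _component_path_parts_from_cycles(cycles: List[List[PointT]]) -> tuple[PointT, PointT, str]:
--     first_start: PointT | None = None
--     last_start: PointT | None = None
--     prev_start: PointT | None = None
--     body_parts: List[str] = []
--
--     for cyc in cycles:
--         corners = _compress_corners(cyc)
--         if not corners:
--             continue
--
--         start = corners[0]
--         if first_start is None:
--             first_start = start
--         else:
--             dx = start[0] - (prev_start[0] if prev_start else 0)
--             dy = start[1] - (prev_start[1] if prev_start else 0)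
--             if dx != 0 or dy != 0:
--                 body_parts.append(f"m{dx} {dy}")
--
--         body_parts.append(_relative_steps_from_corners(corners))
--         prev_start = start
--         last_start = start
--
--     if first_start is None:
--         return (0, 0), (0, 0), ""
--     return first_start, last_start, " ".join(body_parts).strip()
-- ===== SOURCE B (Python) =====
-- # B: run-length scanning instead of register state machines — dedup and the h/v
-- # merging are two-pointer run scans (sum a maximal run, emit once; no last_axis/
-- # last_value registers and no parts[-1] rewriting), the two middle-point filters
-- # share one parametrized window helper, and the entry builds a pieces list first
-- # and assembles it pairwise.
--
-- def _run_starts(points):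
--     out = []
--     i, n = 0, len(points)
--     while i < n:
--         out.append(points[i])
--         while i < n and points[i] == out[-1]:
--             i += 1
--     return out
--
-- def _window_filter(xs, keep):
--     return [xs[0]] + [b for a, b, c in zip(xs, xs[1:], xs[2:]) if keep(a, b, c)] + [xs[-1]]
--
-- def _compress_corners(points):
--     if not points:
--         return points
--     dedup = _run_starts(points)
--     if len(dedup) > 1 and dedup[0] == dedup[-1]:
--         dedup = dedup[:-1]
--     if len(dedup) <= 2:
--         return dedup + dedup[:1]
--     no_rev = _window_filter(dedup, lambda a, b, c: a != c)
--     corners = _window_filter(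
--         no_rev,
--         lambda a, b, c: not (a[0] == b[0] == c[0] or a[1] == b[1] == c[1]))
--     return corners + corners[:1]
--
-- def _relative_steps_from_corners(corners):
--     ds = [(x - px, y - py) for (px, py), (x, y) in zip(corners, corners[1:])]
--     out = []
--     i, n = 0, len(ds)
--     while i < n:
--         dx, dy = ds[i]
--         if dy == 0 and dx != 0:
--             j = i + 1
--             while j < n and ds[j][1] == 0 and ds[j][0] != 0:
--                 j += 1
--             out.append("h%d" % (dx + sum(d[0] for d in ds[i + 1:j])))
--             i = j
--         elif dx == 0 and dy != 0:
--             j = i + 1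
--             while j < n and ds[j][0] == 0 and ds[j][1] != 0:
--                 j += 1
--             out.append("v%d" % (dy + sum(d[1] for d in ds[i + 1:j])))
--             i = j
--         else:
--             out.append("l%d %d" % (dx, dy))
--             i += 1
--     out.append("z")
--     return " ".join(out)
--
-- def _component_path_parts_from_cycles(cycles):
--     pieces = [(c[0], _relative_steps_from_corners(c))
--               for c in map(_compress_corners, cycles) if c]
--     if not pieces:
--         return (0, 0), (0, 0), ""
--     parts = [pieces[0][1]]
--     for (ps, _), (s, body) in zip(pieces, pieces[1:]):
--         dx, dy = s[0] - ps[0], s[1] - ps[1]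
--         if dx != 0 or dy != 0:
--             parts.append("m%d %d" % (dx, dy))
--         parts.append(body)
--     return pieces[0][0], pieces[-1][0], " ".join(parts).strip()
-- ===== Notes on version B (the rewrite author's own statement) =====
-- stated objective: alternative
-- what changed: A's two register state machines (the dedup loop comparing against dedup[-1], and the last_axis/last_value path builder that rewrites parts[-1] in place) are replaced by run-length scans: a two-pointer scan that keeps the first point of each run of equal points, and a two-pointer scan over the delta list that sums a maximal horizontal or vertical run and emits its segment once; the two middle-point filters share one parametrized window helper and the entry builds a pieces list first and assembles it pairwise.
import Mathlib
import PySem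

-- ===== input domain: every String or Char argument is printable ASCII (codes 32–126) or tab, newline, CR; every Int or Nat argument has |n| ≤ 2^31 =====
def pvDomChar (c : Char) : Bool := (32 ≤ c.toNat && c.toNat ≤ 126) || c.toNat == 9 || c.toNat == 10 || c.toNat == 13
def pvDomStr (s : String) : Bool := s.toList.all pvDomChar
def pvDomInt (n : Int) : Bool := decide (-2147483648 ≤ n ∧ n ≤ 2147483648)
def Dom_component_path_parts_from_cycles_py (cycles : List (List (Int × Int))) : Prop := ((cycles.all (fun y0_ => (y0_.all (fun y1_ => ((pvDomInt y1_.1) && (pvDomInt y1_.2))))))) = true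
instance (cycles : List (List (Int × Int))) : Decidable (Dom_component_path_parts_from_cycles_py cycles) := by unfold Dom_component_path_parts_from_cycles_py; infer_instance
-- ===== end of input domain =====

-- B replaces A's register state machines by run-length scans (dedup and h/v merging sum
-- a maximal run and emit once), shares one window-filter helper, assembles pieces pairwise.

-- ===== PORT A =====
-- _compress_corners, transliterated (index loops over range(1, len-1) with xs[i] = pyGetD)
def pvA_compress (points : List (Int × Int)) : List (Int × Int) :=
  if points = [] then points
  else
    let dedup : List (Int × Int) := points.foldl
      (fun dedup p =>
        if dedup = [] ∨ p ≠ PySem.List.pyGetD dedup (-1) (0, 0) then dedup ++ [p] else dedup) []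
    let dedup := if 1 < dedup.length ∧ PySem.List.pyGetD dedup 0 (0, 0) = PySem.List.pyGetD dedup (-1) (0, 0)
      then PySem.List.slice dedup none (some (-1)) else dedup
    if dedup.length ≤ 2 then
      dedup ++ (if dedup ≠ [] then [PySem.List.pyGetD dedup 0 (0, 0)] else [])
    else
      let no_rev := (PySem.List.pyRange 1 ((dedup.length : Int) - 1) 1).foldl
        (fun acc i =>
          if PySem.List.pyGetD dedup (i - 1) (0, 0) = PySem.List.pyGetD dedup (i + 1) (0, 0) then acc
          else acc ++ [PySem.List.pyGetD dedup i (0, 0)])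
        [PySem.List.pyGetD dedup 0 (0, 0)]
      let no_rev := no_rev ++ [PySem.List.pyGetD dedup (-1) (0, 0)]
      let corners := (PySem.List.pyRange 1 ((no_rev.length : Int) - 1) 1).foldl
        (fun acc i =>
          let a := PySem.List.pyGetD no_rev (i - 1) (0, 0)
          let b := PySem.List.pyGetD no_rev i (0, 0)
          let c := PySem.List.pyGetD no_rev (i + 1) (0, 0)
          if (a.1 = b.1 ∧ b.1 = c.1) ∨ (a.2 = b.2 ∧ b.2 = c.2) then acc else acc ++ [b])
        [PySem.List.pyGetD no_rev 0 (0, 0)]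
      let corners := corners ++ [PySem.List.pyGetD no_rev (-1) (0, 0)]
      corners ++ [PySem.List.pyGetD corners 0 (0, 0)]

-- _relative_steps_from_corners, transliterated: one stateful pass (last_axis, last_value, parts);
-- parts[-1] = … is pySetD at -1
def pvA_rel (corners : List (Int × Int)) : String :=
  let st := (PySem.List.pyRange 1 (corners.length : Int) 1).foldl
    (fun (st : Option String × Int × List String) i =>
      let xy := PySem.List.pyGetD corners i (0, 0)
      let pxy := PySem.List.pyGetD corners (i - 1) (0, 0)
      let dx := xy.1 - pxy.1
      let dy := xy.2 - pxy.2
      if dy = 0 ∧ dx ≠ 0 then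
        if st.1 = some "h" then
          (some "h", st.2.1 + dx, PySem.List.pySetD st.2.2 (-1) ("h" ++ PySem.Int.toStr (st.2.1 + dx)))
        else (some "h", dx, st.2.2 ++ ["h" ++ PySem.Int.toStr dx])
      else if dx = 0 ∧ dy ≠ 0 then
        if st.1 = some "v" then
          (some "v", st.2.1 + dy, PySem.List.pySetD st.2.2 (-1) ("v" ++ PySem.Int.toStr (st.2.1 + dy)))
        else (some "v", dy, st.2.2 ++ ["v" ++ PySem.Int.toStr dy])
      else (none, 0, st.2.2 ++ ["l" ++ PySem.Int.toStr dx ++ " " ++ PySem.Int.toStr dy]))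
    (none, 0, [])
  PySem.Str.join " " (st.2.2 ++ ["z"])

def component_path_parts_from_cycles_py (cycles : List (List (Int × Int))) : (Int × Int) × (Int × Int) × String :=
  let st := cycles.foldl
    (fun (st : Option (Int × Int) × Option (Int × Int) × Option (Int × Int) × List String) cyc =>
      let corners := pvA_compress cyc
      if corners = [] then st
      else
        let start := PySem.List.pyGetD corners 0 (0, 0)
        let fb : Option (Int × Int) × List String :=
          match st.1 with
          | none => (some start, st.2.2.2)
          | some f =>
            let dx := start.1 - (match st.2.2.1 with | some p => p.1 | none => 0)
            let dy := start.2 - (match st.2.2.1 with | some p => p.2 | none => 0)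
            (some f,
              if dx ≠ 0 ∨ dy ≠ 0 then st.2.2.2 ++ ["m" ++ PySem.Int.toStr dx ++ " " ++ PySem.Int.toStr dy]
              else st.2.2.2)
        (fb.1, some start, some start, fb.2 ++ [pvA_rel corners]))
    (none, none, none, [])
  match st.1 with
  | none => ((0, 0), (0, 0), "")
  | some f => (f, st.2.1.getD (0, 0), PySem.Str.strip (PySem.Str.join " " st.2.2.2))

-- ===== PORT B =====
-- _run_starts: two-pointer run scan (keep the first point of each maximal run of equal points)
def pvRunStarts : List (Int × Int) → List (Int × Int)
  | [] => []
  | p :: rest => p :: pvRunStarts (rest.dropWhile (fun q => q == p))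
termination_by l => l.length
decreasing_by
  exact Nat.lt_succ_of_le (List.length_dropWhile_le _ rest)

-- _window_filter: keep first/last and the middle points the predicate keeps
def pvWindowFilter (xs : List (Int × Int)) (keep : (Int × Int) → (Int × Int) → (Int × Int) → Bool) : List (Int × Int) :=
  [PySem.List.pyGetD xs 0 (0, 0)] ++
    (((xs.zip (xs.drop 1)).zip (xs.drop 2)).filterMap
      (fun t => if keep t.1.1 t.1.2 t.2 then some t.1.2 else none)) ++
    [PySem.List.pyGetD xs (-1) (0, 0)]

def pvB_compress (points : List (Int × Int)) : List (Int × Int) :=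
  if points = [] then points
  else
    let dedup := pvRunStarts points
    let dedup := if 1 < dedup.length ∧ PySem.List.pyGetD dedup 0 (0, 0) = PySem.List.pyGetD dedup (-1) (0, 0)
      then PySem.List.slice dedup none (some (-1)) else dedup
    if dedup.length ≤ 2 then dedup ++ dedup.take 1
    else
      let no_rev := pvWindowFilter dedup (fun a _ c => a != c)
      let corners := pvWindowFilter no_rev
        (fun a b c => !((a.1 == b.1 && b.1 == c.1) || (a.2 == b.2 && b.2 == c.2)))
      corners ++ corners.take 1

def pvHRun (e : Int × Int) : Bool := e.2 == 0 && e.1 != 0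
def pvVRun (e : Int × Int) : Bool := e.1 == 0 && e.2 != 0

-- the run scan of _relative_steps_from_corners: sum a maximal h- or v-run, emit once
def pvBSteps : List (Int × Int) → List String
  | [] => []
  | d :: rest =>
    if d.2 = 0 ∧ d.1 ≠ 0 then
      ("h" ++ PySem.Int.toStr (d.1 + ((rest.takeWhile pvHRun).map Prod.fst).sum))
        :: pvBSteps (rest.dropWhile pvHRun)
    else if d.1 = 0 ∧ d.2 ≠ 0 then
      ("v" ++ PySem.Int.toStr (d.2 + ((rest.takeWhile pvVRun).map Prod.snd).sum))
        :: pvBSteps (rest.dropWhile pvVRun)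
    else
      ("l" ++ PySem.Int.toStr d.1 ++ " " ++ PySem.Int.toStr d.2) :: pvBSteps rest
termination_by l => l.length
decreasing_by
  · exact Nat.lt_succ_of_le (List.length_dropWhile_le _ rest)
  · exact Nat.lt_succ_of_le (List.length_dropWhile_le _ rest)
  · exact Nat.lt_succ_of_le (Nat.le_refl rest.length)

def pvB_rel (corners : List (Int × Int)) : String :=
  let ds := (corners.zip (corners.drop 1)).map (fun pr => (pr.2.1 - pr.1.1, pr.2.2 - pr.1.2))
  PySem.Str.join " " (pvBSteps ds ++ ["z"])

def component_path_parts_from_cycles_py_alt (cycles : List (List (Int × Int))) : (Int × Int) × (Int × Int) × String :=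
  let pieces := (cycles.map pvB_compress).filterMap
    (fun c => match c with | [] => none | p :: rest => some (p, pvB_rel (p :: rest)))
  match pieces with
  | [] => ((0, 0), (0, 0), "")
  | q :: qs =>
    let parts := ((q :: qs).zip qs).foldl
      (fun acc pr =>
        let dx := pr.2.1.1 - pr.1.1.1
        let dy := pr.2.1.2 - pr.1.1.2
        (if dx ≠ 0 ∨ dy ≠ 0 then acc ++ ["m" ++ PySem.Int.toStr dx ++ " " ++ PySem.Int.toStr dy] else acc)
          ++ [pr.2.2]) [q.2]
    (q.1, (PySem.List.pyGetD pieces (-1) ((0, 0), "")).1, PySem.Str.strip (PySem.Str.join " " parts))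

-- ===== PRECONDITION & SPEC =====
def Spec_component_path_parts_from_cycles_py (cycles : List (List (Int × Int))) (out : (Int × Int) × (Int × Int) × String) : Prop := out = component_path_parts_from_cycles_py_alt cycles
instance (cycles : List (List (Int × Int))) (out : (Int × Int) × (Int × Int) × String) : Decidable (Spec_component_path_parts_from_cycles_py cycles out) := by unfold Spec_component_path_parts_from_cycles_py; infer_instance

-- ===== CLAIM (what is proved, stated in full; the proofs are below) =====
def Claim_equal_component_path_parts_from_cycles_py : Prop := ∀ (cycles : List (List (Int × Int))), Dom_component_path_parts_from_cycles_py cycles → Spec_component_path_parts_from_cycles_py cycles (component_path_parts_from_cycles_py cycles)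

-- ===== LEMMAS AND PROOFS =====

def pvBDedup (prev : Option (Int × Int)) : List (Int × Int) → List (Int × Int)
  | [] => []
  | p :: l => if some p ≠ prev then p :: pvBDedup (some p) l else pvBDedup (some p) l

theorem pvA_dedup_inv (l : List (Int × Int)) (ys : List (Int × Int)) (x : Int × Int) :
    List.foldl (fun dedup p =>
      if dedup = [] ∨ p ≠ PySem.List.pyGetD dedup (-1) (0, 0) then dedup ++ [p] else dedup)
      (ys ++ [x]) l = (ys ++ [x]) ++ pvBDedup (some x) l := by
  induction l generalizing ys x with
  | nil => simp [pvBDedup]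
  | cons p t ih =>
    simp only [List.foldl_cons, pvBDedup]
    rw [PySem.List.pyGetD_neg_one_append_singleton]
    by_cases hpx : p = x
    · subst hpx
      simp only [List.append_eq_nil_iff, ne_eq, not_true_eq_false, or_false, reduceIte]
      simp [ih]
    · have h1 : (ys ++ [x] = [] ∨ ¬ p = x) := Or.inr hpx
      rw [if_pos h1, if_pos (by simp [hpx])]
      have := ih (ys ++ [x]) p
      simp only [List.append_assoc] at this ⊢
      rw [this]
      simp

theorem pvA_dedup_eq (points : List (Int × Int)) :
    points.foldl (fun dedup p =>
      if dedup = [] ∨ p ≠ PySem.List.pyGetD dedup (-1) (0, 0) then dedup ++ [p] else dedup) []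
    = pvBDedup none points := by
  cases points with
  | nil => simp [pvBDedup]
  | cons p t =>
    simp only [List.foldl_cons, List.nil_append, pvBDedup]
    rw [if_pos (Or.inl trivial), if_pos (by simp)]
    have := pvA_dedup_inv t [] p
    simpa using this

theorem pvRunStarts_eq_dedup_aux (t : List (Int × Int)) :
    ∀ p : Int × Int, pvBDedup (some p) t = pvRunStarts (t.dropWhile (fun q => q == p)) := by
  induction t with
  | nil => intro p; simp [pvBDedup, pvRunStarts]
  | cons q t ih =>
    intro p
    by_cases hqp : q = p
    · subst hqp
      simp only [pvBDedup, ne_eq, not_true_eq_false, reduceIte]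
      rw [List.dropWhile_cons_of_pos (by simp)]
      exact ih q
    · simp only [pvBDedup, ne_eq, Option.some.injEq, hqp, not_false_eq_true, reduceIte]
      rw [List.dropWhile_cons_of_neg (by simp [hqp])]
      rw [pvRunStarts]
      rw [ih q]

theorem pvRunStarts_eq_dedup (points : List (Int × Int)) :
    pvRunStarts points = pvBDedup none points := by
  cases points with
  | nil => simp [pvRunStarts, pvBDedup]
  | cons p t =>
    rw [pvRunStarts, pvBDedup]
    simp only [ne_eq, reduceCtorEq, not_false_eq_true, reduceIte]
    rw [pvRunStarts_eq_dedup_aux t p]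

theorem pv_foldl_skip {α β : Type} (l : List α) (p : α → Prop) [DecidablePred p] (f : α → β)
    (acc : List β) :
    l.foldl (fun acc x => if p x then acc else acc ++ [f x]) acc
      = acc ++ l.filterMap (fun x => if p x then none else some (f x)) := by
  induction l generalizing acc with
  | nil => simp
  | cons x t ih =>
    simp only [List.foldl_cons, List.filterMap_cons]
    by_cases h : p x
    · simp [h, ih]
    · simp [h, ih]

theorem pv_getD_elem (xs : List (Int × Int)) (i j : ℕ) (h : i < xs.length) (e : i = j) :
    xs[i]'h = xs.getD j (0, 0) := by
  subst e; rw [List.getD_eq_getElem]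

theorem pv_zip2_eq (xs : List (Int × Int)) :
    xs.zip (xs.drop 1) = (List.range (xs.length - 1)).map
      (fun k => (xs.getD k (0, 0), xs.getD (k + 1) (0, 0))) := by
  apply List.ext_getElem
  · simp
  · intro k h1 h2
    simp only [List.length_zip, List.length_drop] at h1 h2
    simp only [List.getElem_zip, List.getElem_map, List.getElem_range, List.getElem_drop,
      Prod.mk.injEq]
    exact ⟨pv_getD_elem xs _ _ _ rfl, pv_getD_elem xs _ _ (by omega) (by omega)⟩

theorem pv_zip3_eq (xs : List (Int × Int)) :
    (xs.zip (xs.drop 1)).zip (xs.drop 2) = (List.range (xs.length - 2)).map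
      (fun k => ((xs.getD k (0, 0), xs.getD (k + 1) (0, 0)), xs.getD (k + 2) (0, 0))) := by
  apply List.ext_getElem
  · simp; omega
  · intro k h1 h2
    simp only [List.length_zip, List.length_drop] at h1 h2
    simp only [List.getElem_zip, List.getElem_map, List.getElem_range, List.getElem_drop,
      Prod.mk.injEq]
    exact ⟨⟨pv_getD_elem xs _ _ (by omega) rfl, pv_getD_elem xs _ _ (by omega) (by omega)⟩,
      pv_getD_elem xs _ _ (by omega) (by omega)⟩

theorem pv_filterMap_map {α β γ : Type} (l : List α) (f : α → β) (g : β → Option γ) :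
    (l.map f).filterMap g = l.filterMap (fun x => g (f x)) := by
  simp [List.filterMap_map]

theorem pv_triple_loop (xs : List (Int × Int))
    (p : (Int × Int) → (Int × Int) → (Int × Int) → Prop)
    [∀ a b c, Decidable (p a b c)] (acc0 : List (Int × Int)) :
    (PySem.List.pyRange 1 ((xs.length : Int) - 1) 1).foldl
      (fun acc i =>
        if p (PySem.List.pyGetD xs (i - 1) (0, 0)) (PySem.List.pyGetD xs i (0, 0))
            (PySem.List.pyGetD xs (i + 1) (0, 0))
        then acc else acc ++ [PySem.List.pyGetD xs i (0, 0)]) acc0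
    = acc0 ++ ((xs.zip (xs.drop 1)).zip (xs.drop 2)).filterMap
        (fun t => if p t.1.1 t.1.2 t.2 then none else some t.1.2) := by
  rw [PySem.List.pyRange_one, List.foldl_map, pv_foldl_skip
    (p := fun (k : ℕ) => p (PySem.List.pyGetD xs (1 + (k : Int) - 1) (0, 0))
      (PySem.List.pyGetD xs (1 + (k : Int)) (0, 0)) (PySem.List.pyGetD xs (1 + (k : Int) + 1) (0, 0)))
    (f := fun (k : ℕ) => PySem.List.pyGetD xs (1 + (k : Int)) (0, 0))]
  congr 1
  rw [pv_zip3_eq, pv_filterMap_map]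
  have hlen : ((xs.length : Int) - 1 - 1).toNat = xs.length - 2 := by omega
  rw [hlen]
  apply List.filterMap_congr
  intro k hk
  simp only [List.mem_range] at hk
  have e1 : (1 : Int) + k - 1 = (k : Int) := by ring
  have e2 : (1 : Int) + k = ((k + 1 : ℕ) : Int) := by push_cast; ring
  have e3 : (((k + 1 : ℕ) : Int)) + 1 = ((k + 2 : ℕ) : Int) := by push_cast; ring
  rw [e1, e2, e3, PySem.List.pyGetD_natCast, PySem.List.pyGetD_natCast, PySem.List.pyGetD_natCast]

theorem pv_pair_loop {σ : Type} (xs : List (Int × Int))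
    (g : σ → (Int × Int) → (Int × Int) → σ) (init : σ) :
    (PySem.List.pyRange 1 (xs.length : Int) 1).foldl
      (fun st i => g st (PySem.List.pyGetD xs (i - 1) (0, 0)) (PySem.List.pyGetD xs i (0, 0))) init
    = (xs.zip (xs.drop 1)).foldl (fun st pr => g st pr.1 pr.2) init := by
  rw [PySem.List.pyRange_one, List.foldl_map, pv_zip2_eq, List.foldl_map]
  have hlen : ((xs.length : Int) - 1).toNat = xs.length - 1 := by omega
  rw [hlen]
  apply PySem.List.foldl_congr_mem
  intro acc k hk
  simp only [List.mem_range] at hk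
  have e1 : (1 : Int) + k - 1 = (k : Int) := by ring
  have e2 : (1 : Int) + k = ((k + 1 : ℕ) : Int) := by push_cast; ring
  rw [e1, e2, PySem.List.pyGetD_natCast, PySem.List.pyGetD_natCast]

theorem pv_compress_eq (points : List (Int × Int)) : pvA_compress points = pvB_compress points := by
  by_cases h : points = []
  · simp [pvA_compress, pvB_compress, h]
  · simp only [pvA_compress, pvB_compress, if_neg h]
    rw [pvA_dedup_eq, ← pvRunStarts_eq_dedup]
    set dd0 := pvRunStarts points with hdd0
    set dd := if 1 < dd0.length ∧ PySem.List.pyGetD dd0 0 (0, 0) = PySem.List.pyGetD dd0 (-1) (0, 0)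
      then PySem.List.slice dd0 none (some (-1)) else dd0 with hdd
    by_cases h2 : dd.length ≤ 2
    · rw [if_pos h2, if_pos h2]
      cases dd with
      | nil => simp
      | cons d t => simp [PySem.List.pyGetD_zero_cons]
    · rw [if_neg h2, if_neg h2]
      rw [pv_triple_loop dd (fun a b c => a = c),
        pv_triple_loop _ (fun a b c => (a.1 = b.1 ∧ b.1 = c.1) ∨ (a.2 = b.2 ∧ b.2 = c.2))]
      unfold pvWindowFilter
      have hf1 : (fun (t : ((Int × Int) × (Int × Int)) × (Int × Int)) =>
          if (t.1.1 != t.2) = true then some t.1.2 else none)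
          = (fun t => if t.1.1 = t.2 then none else some t.1.2) := by
        funext t; by_cases ht : t.1.1 = t.2 <;> simp [ht]
      have hf2 : (fun (t : ((Int × Int) × (Int × Int)) × (Int × Int)) =>
          if (!((t.1.1.1 == t.1.2.1 && t.1.2.1 == t.2.1) || (t.1.1.2 == t.1.2.2 && t.1.2.2 == t.2.2))) = true
          then some t.1.2 else none)
          = (fun t => if (t.1.1.1 = t.1.2.1 ∧ t.1.2.1 = t.2.1) ∨ (t.1.1.2 = t.1.2.2 ∧ t.1.2.2 = t.2.2)
              then none else some t.1.2) := by
        funext t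
        by_cases ht : (t.1.1.1 = t.1.2.1 ∧ t.1.2.1 = t.2.1) ∨ (t.1.1.2 = t.1.2.2 ∧ t.1.2.2 = t.2.2) <;>
          · simp [ht]
            tauto
      rw [hf1, hf2]
      simp only [List.append_assoc, List.cons_append, List.nil_append,
        PySem.List.pyGetD_zero_cons, List.take_succ_cons, List.take_zero]

-- ----- relative steps -----

def pvStepAd (st : Option String × Int × List String) (d : Int × Int) :
    Option String × Int × List String :=
  if d.2 = 0 ∧ d.1 ≠ 0 then
    if st.1 = some "h" then
      (some "h", st.2.1 + d.1, PySem.List.pySetD st.2.2 (-1) ("h" ++ PySem.Int.toStr (st.2.1 + d.1)))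
    else (some "h", d.1, st.2.2 ++ ["h" ++ PySem.Int.toStr d.1])
  else if d.1 = 0 ∧ d.2 ≠ 0 then
    if st.1 = some "v" then
      (some "v", st.2.1 + d.2, PySem.List.pySetD st.2.2 (-1) ("v" ++ PySem.Int.toStr (st.2.1 + d.2)))
    else (some "v", d.2, st.2.2 ++ ["v" ++ PySem.Int.toStr d.2])
  else (none, 0, st.2.2 ++ ["l" ++ PySem.Int.toStr d.1 ++ " " ++ PySem.Int.toStr d.2])

theorem pv_pySetD_concat (xs : List String) (x v : String) :
    PySem.List.pySetD (xs ++ [x]) (-1) v = xs ++ [v] := by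
  simp [PySem.List.pySetD, PySem.List.pySet?, PySem.List.pyIdx?]

theorem pvHrun_fold (run : List (Int × Int)) (h : ∀ e ∈ run, pvHRun e = true) (v : Int)
    (acc : List String) :
    run.foldl pvStepAd (some "h", v, acc ++ ["h" ++ PySem.Int.toStr v])
      = (some "h", v + (run.map Prod.fst).sum,
          acc ++ ["h" ++ PySem.Int.toStr (v + (run.map Prod.fst).sum)]) := by
  induction run generalizing v with
  | nil => simp
  | cons e t ih =>
    have he := h e (by simp)
    have he' : e.2 = 0 ∧ e.1 ≠ 0 := by
      simp [pvHRun] at he; exact ⟨he.1, he.2⟩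
    simp only [List.foldl_cons, pvStepAd, if_pos he']
    simp only [reduceIte, pv_pySetD_concat]
    rw [ih (fun x hx => h x (by simp [hx])) (v + e.1)]
    simp only [List.map_cons, List.sum_cons]
    have hv : v + e.1 + (t.map Prod.fst).sum = v + (e.1 + (t.map Prod.fst).sum) := by ring
    rw [hv]

theorem pvVrun_fold (run : List (Int × Int)) (h : ∀ e ∈ run, pvVRun e = true) (v : Int)
    (acc : List String) :
    run.foldl pvStepAd (some "v", v, acc ++ ["v" ++ PySem.Int.toStr v])
      = (some "v", v + (run.map Prod.snd).sum,
          acc ++ ["v" ++ PySem.Int.toStr (v + (run.map Prod.snd).sum)]) := by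
  induction run generalizing v with
  | nil => simp
  | cons e t ih =>
    have he := h e (by simp)
    have he' : e.1 = 0 ∧ e.2 ≠ 0 := by
      simp [pvVRun] at he; exact ⟨he.1, he.2⟩
    have hnot : ¬ (e.2 = 0 ∧ e.1 ≠ 0) := by
      intro hc; exact hc.2 he'.1
    simp only [List.foldl_cons, pvStepAd, if_neg hnot, if_pos he']
    simp only [reduceIte, pv_pySetD_concat]
    rw [ih (fun x hx => h x (by simp [hx])) (v + e.2)]
    simp only [List.map_cons, List.sum_cons]
    have hv : v + e.2 + (t.map Prod.snd).sum = v + (e.2 + (t.map Prod.snd).sum) := by ring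
    rw [hv]

theorem pv_head_dropWhile {α : Type} (p : α → Bool) (l : List α) (d : α)
    (h : (l.dropWhile p).head? = some d) : p d = false := by
  induction l with
  | nil => simp [List.dropWhile] at h
  | cons x t ih =>
    by_cases hx : p x
    · rw [List.dropWhile_cons_of_pos hx] at h; exact ih h
    · rw [List.dropWhile_cons_of_neg hx] at h
      simp at h
      subst h
      simpa using hx

theorem pvSteps_main (ds : List (Int × Int)) (ax : Option String) (v : Int) (acc : List String)
    (hok : ∀ d, ds.head? = some d →
      (ax = some "h" → ¬ (d.2 = 0 ∧ d.1 ≠ 0)) ∧ (ax = some "v" → ¬ (d.1 = 0 ∧ d.2 ≠ 0))) :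
    (ds.foldl pvStepAd (ax, v, acc)).2.2 = acc ++ pvBSteps ds := by
  match ds with
  | [] => simp [pvBSteps]
  | d :: rest =>
    by_cases hH : d.2 = 0 ∧ d.1 ≠ 0
    · have hax : ax ≠ some "h" := by
        intro hc
        exact ((hok d rfl).1 hc) hH
      rw [List.foldl_cons]
      have hstep : pvStepAd (ax, v, acc) d = (some "h", d.1, acc ++ ["h" ++ PySem.Int.toStr d.1]) := by
        simp only [pvStepAd, if_pos hH]
        rw [if_neg hax]
      rw [hstep]
      have hsplit : rest = rest.takeWhile pvHRun ++ rest.dropWhile pvHRun :=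
        (List.takeWhile_append_dropWhile (p := pvHRun) (l := rest)).symm
      rw [show rest.foldl pvStepAd (some "h", d.1, acc ++ ["h" ++ PySem.Int.toStr d.1])
            = (rest.takeWhile pvHRun ++ rest.dropWhile pvHRun).foldl pvStepAd
                (some "h", d.1, acc ++ ["h" ++ PySem.Int.toStr d.1]) by rw [← hsplit]]
      rw [List.foldl_append]
      rw [pvHrun_fold _ (fun e he => List.mem_takeWhile_imp he) d.1 acc]
      rw [pvSteps_main (rest.dropWhile pvHRun) (some "h")
        (d.1 + ((rest.takeWhile pvHRun).map Prod.fst).sum)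
        (acc ++ ["h" ++ PySem.Int.toStr (d.1 + ((rest.takeWhile pvHRun).map Prod.fst).sum)])
        (by
          intro e he
          constructor
          · intro _
            have := pv_head_dropWhile pvHRun rest e he
            simp [pvHRun] at this
            intro hc
            rcases hc with ⟨h20, h1ne⟩
            exact h1ne (this h20)
          · intro hc; simp at hc)]
      rw [pvBSteps]
      simp only [if_pos hH]
      simp
    · by_cases hV : d.1 = 0 ∧ d.2 ≠ 0
      · have hax : ax ≠ some "v" := by
          intro hc
          exact ((hok d rfl).2 hc) hV
        rw [List.foldl_cons]
        have hstep : pvStepAd (ax, v, acc) d = (some "v", d.2, acc ++ ["v" ++ PySem.Int.toStr d.2]) := by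
          simp only [pvStepAd, if_neg hH, if_pos hV]
          rw [if_neg hax]
        rw [hstep]
        have hsplit : rest = rest.takeWhile pvVRun ++ rest.dropWhile pvVRun :=
          (List.takeWhile_append_dropWhile (p := pvVRun) (l := rest)).symm
        rw [show rest.foldl pvStepAd (some "v", d.2, acc ++ ["v" ++ PySem.Int.toStr d.2])
              = (rest.takeWhile pvVRun ++ rest.dropWhile pvVRun).foldl pvStepAd
                  (some "v", d.2, acc ++ ["v" ++ PySem.Int.toStr d.2]) by rw [← hsplit]]
        rw [List.foldl_append]
        rw [pvVrun_fold _ (fun e he => List.mem_takeWhile_imp he) d.2 acc]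
        rw [pvSteps_main (rest.dropWhile pvVRun) (some "v")
          (d.2 + ((rest.takeWhile pvVRun).map Prod.snd).sum)
          (acc ++ ["v" ++ PySem.Int.toStr (d.2 + ((rest.takeWhile pvVRun).map Prod.snd).sum)])
          (by
            intro e he
            constructor
            · intro hc; simp at hc
            · intro _
              have := pv_head_dropWhile pvVRun rest e he
              simp [pvVRun] at this
              intro hc
              rcases hc with ⟨h10, h2ne⟩
              exact h2ne (this h10))]
        rw [pvBSteps]
        simp only [if_neg hH, if_pos hV]
        simp
      · rw [List.foldl_cons]
        have hstep : pvStepAd (ax, v, acc) d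
            = (none, 0, acc ++ ["l" ++ PySem.Int.toStr d.1 ++ " " ++ PySem.Int.toStr d.2]) := by
          simp only [pvStepAd, if_neg hH, if_neg hV]
        rw [hstep]
        rw [pvSteps_main rest none 0
          (acc ++ ["l" ++ PySem.Int.toStr d.1 ++ " " ++ PySem.Int.toStr d.2])
          (by intro e _; constructor <;> (intro hc; simp at hc))]
        rw [pvBSteps]
        simp only [if_neg hH, if_neg hV]
        simp
termination_by ds.length
decreasing_by
  · exact Nat.lt_succ_of_le (List.length_dropWhile_le _ rest)
  · exact Nat.lt_succ_of_le (List.length_dropWhile_le _ rest)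
  · exact Nat.lt_succ_of_le (Nat.le_refl rest.length)

theorem pv_rel_eq (corners : List (Int × Int)) : pvA_rel corners = pvB_rel corners := by
  simp only [pvA_rel, pvB_rel]
  rw [pv_pair_loop corners (fun st a b =>
    if b.2 - a.2 = 0 ∧ b.1 - a.1 ≠ 0 then
      if st.1 = some "h" then
        (some "h", st.2.1 + (b.1 - a.1),
          PySem.List.pySetD st.2.2 (-1) ("h" ++ PySem.Int.toStr (st.2.1 + (b.1 - a.1))))
      else (some "h", b.1 - a.1, st.2.2 ++ ["h" ++ PySem.Int.toStr (b.1 - a.1)])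
    else if b.1 - a.1 = 0 ∧ b.2 - a.2 ≠ 0 then
      if st.1 = some "v" then
        (some "v", st.2.1 + (b.2 - a.2),
          PySem.List.pySetD st.2.2 (-1) ("v" ++ PySem.Int.toStr (st.2.1 + (b.2 - a.2))))
      else (some "v", b.2 - a.2, st.2.2 ++ ["v" ++ PySem.Int.toStr (b.2 - a.2)])
    else (none, 0, st.2.2 ++ ["l" ++ PySem.Int.toStr (b.1 - a.1) ++ " " ++ PySem.Int.toStr (b.2 - a.2)]))
    (none, 0, [])]
  rw [PySem.List.foldl_congr_mem
    (g := fun (st : Option String × Int × List String) (pr : (Int × Int) × (Int × Int)) =>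
      pvStepAd st (pr.2.1 - pr.1.1, pr.2.2 - pr.1.2))
    (h := by intro acc pr _; simp only [pvStepAd])]
  rw [show (fun (st : Option String × Int × List String) (pr : (Int × Int) × (Int × Int)) =>
        pvStepAd st (pr.2.1 - pr.1.1, pr.2.2 - pr.1.2))
      = fun st pr => pvStepAd st ((fun (pr : (Int × Int) × (Int × Int)) =>
          (pr.2.1 - pr.1.1, pr.2.2 - pr.1.2)) pr) from rfl]
  rw [← List.foldl_map (f := fun (pr : (Int × Int) × (Int × Int)) => (pr.2.1 - pr.1.1, pr.2.2 - pr.1.2))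
    (g := pvStepAd)]
  rw [pvSteps_main _ none 0 [] (by intro e _; constructor <;> (intro hc; simp at hc))]
  simp

-- ----- entry function -----

def pvPiecesOf (cycles : List (List (Int × Int))) : List ((Int × Int) × String) :=
  (cycles.map pvB_compress).filterMap
    (fun c => match c with | [] => none | p :: rest => some (p, pvB_rel (p :: rest)))

def pvPartsAux (ps : Int × Int) : List ((Int × Int) × String) → List String
  | [] => []
  | r :: t =>
    (if r.1.1 - ps.1 ≠ 0 ∨ r.1.2 - ps.2 ≠ 0 then
      ["m" ++ PySem.Int.toStr (r.1.1 - ps.1) ++ " " ++ PySem.Int.toStr (r.1.2 - ps.2)] else [])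
      ++ r.2 :: pvPartsAux r.1 t

def pvLastOf (p : Int × Int) : List ((Int × Int) × String) → (Int × Int)
  | [] => p
  | r :: t => pvLastOf r.1 t

theorem pv_partsB (qs : List ((Int × Int) × String)) (prev : (Int × Int) × String)
    (acc : List String) :
    ((prev :: qs).zip qs).foldl
      (fun acc pr =>
        (if pr.2.1.1 - pr.1.1.1 ≠ 0 ∨ pr.2.1.2 - pr.1.1.2 ≠ 0 then
          acc ++ ["m" ++ PySem.Int.toStr (pr.2.1.1 - pr.1.1.1) ++ " " ++ PySem.Int.toStr (pr.2.1.2 - pr.1.1.2)]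
        else acc) ++ [pr.2.2]) acc
      = acc ++ pvPartsAux prev.1 qs := by
  induction qs generalizing prev acc with
  | nil => simp [pvPartsAux]
  | cons r t ih =>
    simp only [List.zip_cons_cons, List.foldl_cons, pvPartsAux]
    rw [ih]
    by_cases hd : r.1.1 - prev.1.1 ≠ 0 ∨ r.1.2 - prev.1.2 ≠ 0
    · rw [if_pos hd, if_pos hd]; simp
    · rw [if_neg hd, if_neg hd]; simp

theorem pv_lastOf_getLast (qs : List ((Int × Int) × String)) (q : (Int × Int) × String) :
    pvLastOf q.1 qs = ((q :: qs).getLast (List.cons_ne_nil q qs)).1 := by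
  induction qs generalizing q with
  | nil => rfl
  | cons r t ih => simpa [pvLastOf] using ih r

def pvStepEnt (st : Option (Int × Int) × Option (Int × Int) × Option (Int × Int) × List String)
    (cyc : List (Int × Int)) : Option (Int × Int) × Option (Int × Int) × Option (Int × Int) × List String :=
  let corners := pvA_compress cyc
  if corners = [] then st
  else
    let start := PySem.List.pyGetD corners 0 (0, 0)
    let fb : Option (Int × Int) × List String :=
      match st.1 with
      | none => (some start, st.2.2.2)
      | some f =>
        let dx := start.1 - (match st.2.2.1 with | some p => p.1 | none => 0)
        let dy := start.2 - (match st.2.2.1 with | some p => p.2 | none => 0)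
        (some f,
          if dx ≠ 0 ∨ dy ≠ 0 then st.2.2.2 ++ ["m" ++ PySem.Int.toStr dx ++ " " ++ PySem.Int.toStr dy]
          else st.2.2.2)
    (fb.1, some start, some start, fb.2 ++ [pvA_rel corners])

theorem pv_entryA (cs : List (List (Int × Int))) (fq pl : Int × Int) (body : List String) :
    cs.foldl pvStepEnt (some fq, some pl, some pl, body)
    = (some fq, some (pvLastOf pl (pvPiecesOf cs)), some (pvLastOf pl (pvPiecesOf cs)),
        body ++ pvPartsAux pl (pvPiecesOf cs)) := by
  induction cs generalizing pl body with
  | nil => simp [pvPiecesOf, pvPartsAux, pvLastOf]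
  | cons c t ih =>
    simp only [List.foldl_cons]
    rcases hc : pvA_compress c with _ | ⟨p, rest⟩
    · have hcB : pvB_compress c = [] := by rw [← pv_compress_eq, hc]
      have hstep : pvStepEnt (some fq, some pl, some pl, body) c = (some fq, some pl, some pl, body) := by
        simp [pvStepEnt, hc]
      rw [hstep, ih]
      simp [pvPiecesOf, hcB]
    · have hcB : pvB_compress c = p :: rest := by rw [← pv_compress_eq, hc]
      have hstep : pvStepEnt (some fq, some pl, some pl, body) c
          = (some fq, some p, some p,
              (if p.1 - pl.1 ≠ 0 ∨ p.2 - pl.2 ≠ 0 then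
                body ++ ["m" ++ PySem.Int.toStr (p.1 - pl.1) ++ " " ++ PySem.Int.toStr (p.2 - pl.2)]
              else body) ++ [pvA_rel (p :: rest)]) := by
        simp [pvStepEnt, hc]
      rw [hstep, ih]
      have hrel : pvA_rel (p :: rest) = pvB_rel (p :: rest) := pv_rel_eq _
      have hps : pvPiecesOf (c :: t) = (p, pvB_rel (p :: rest)) :: pvPiecesOf t := by
        simp [pvPiecesOf, hcB]
      rw [hps]
      simp only [pvPartsAux, pvLastOf, hrel]
      by_cases hd : p.1 - pl.1 ≠ 0 ∨ p.2 - pl.2 ≠ 0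
      · rw [if_pos hd, if_pos hd]; simp
      · rw [if_neg hd, if_neg hd]; simp

theorem pv_entryA0 (cs : List (List (Int × Int))) :
    cs.foldl pvStepEnt (none, none, none, [])
    = (match pvPiecesOf cs with
       | [] => (none, none, none, [])
       | q :: qs => (some q.1, some (pvLastOf q.1 qs), some (pvLastOf q.1 qs),
           q.2 :: pvPartsAux q.1 qs)) := by
  induction cs with
  | nil => rfl
  | cons c t ih =>
    simp only [List.foldl_cons]
    rcases hc : pvA_compress c with _ | ⟨p, rest⟩
    · have hcB : pvB_compress c = [] := by rw [← pv_compress_eq, hc]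
      have hstep : pvStepEnt (none, none, none, []) c = (none, none, none, []) := by
        simp [pvStepEnt, hc]
      rw [hstep, ih]
      have : pvPiecesOf (c :: t) = pvPiecesOf t := by simp [pvPiecesOf, hcB]
      rw [this]
    · have hcB : pvB_compress c = p :: rest := by rw [← pv_compress_eq, hc]
      have hstep : pvStepEnt (none, none, none, []) c
          = (some p, some p, some p, [pvA_rel (p :: rest)]) := by
        simp [pvStepEnt, hc]
      rw [hstep, pv_entryA]
      have hps : pvPiecesOf (c :: t) = (p, pvB_rel (p :: rest)) :: pvPiecesOf t := by
        simp [pvPiecesOf, hcB]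
      rw [hps, pv_rel_eq]
      simp

-- ===== VERDICT (by name: the statement is the Claim_ definition above) =====
theorem component_path_parts_from_cycles_py_spec : Claim_equal_component_path_parts_from_cycles_py := by
  intro cycles _
  unfold Spec_component_path_parts_from_cycles_py
  unfold component_path_parts_from_cycles_py component_path_parts_from_cycles_py_alt
  rw [show (fun (st : Option (Int × Int) × Option (Int × Int) × Option (Int × Int) × List String) cyc =>
      let corners := pvA_compress cyc
      if corners = [] then st
      else
        let start := PySem.List.pyGetD corners 0 (0, 0)
        let fb : Option (Int × Int) × List String :=
          match st.1 with
          | none => (some start, st.2.2.2)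
          | some f =>
            let dx := start.1 - (match st.2.2.1 with | some p => p.1 | none => 0)
            let dy := start.2 - (match st.2.2.1 with | some p => p.2 | none => 0)
            (some f,
              if dx ≠ 0 ∨ dy ≠ 0 then st.2.2.2 ++ ["m" ++ PySem.Int.toStr dx ++ " " ++ PySem.Int.toStr dy]
              else st.2.2.2)
        (fb.1, some start, some start, fb.2 ++ [pvA_rel corners])) = pvStepEnt from rfl]
  rw [pv_entryA0]
  have hp2 : ((cycles.map pvB_compress).filterMap
      (fun c => match c with | [] => none | p :: rest => some (p, pvB_rel (p :: rest))))
      = pvPiecesOf cycles := rfl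
  rw [hp2]
  rcases hq : pvPiecesOf cycles with _ | ⟨q, qs⟩
  · rfl
  · simp only []
    rw [pv_partsB qs q [q.2]]
    have hlast : (PySem.List.pyGetD ((q :: qs)) (-1) ((0, 0), "")).1 = pvLastOf q.1 qs := by
      rw [PySem.List.pyGetD_neg_one (xs := q :: qs) (h := List.cons_ne_nil q qs),
        pv_lastOf_getLast]
    rw [hlast]
    simp
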